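-- pv_equiv track=rewrite | github.com/minwook-shin/kookmin-cs-assignments | algorithm/analysis/hw_4/find_minimal_item_hw.py | find_minimal_item
-- ===== SOURCE A (Python) =====
-- def find_minimal_item(a, n, start=0, current=None, save=None):
--     if save is None:
--         save = []
--     if current is None:
--         current = []
--     if start >= n:
--         return save
--     else:
--         if not current or a[start] < current[0]:
--             current = [a[start]]
--             save.append(len(current))
--         else:
--             current.append(a[start])
--             save.append(len(current))
--         return find_minimal_item(a, n, start + 1, current, save)
-- ===== SOURCE B (Python) =====
-- def find_minimal_item(a, n, start=0, current=None, save=None):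
--     # Iterative one-pass version; tracks only the anchor minimum and a run
--     # counter instead of materializing `current` (return value only; B does
--     # not mutate the caller's lists).
--     cur = current if current is not None else []
--     anchor = cur[0] if cur else None
--     count = len(cur)
--     out = list(save) if save is not None else []
--     for i in range(start, n):
--         v = a[i]
--         if anchor is None or v < anchor:
--             anchor = v
--             count = 1
--         else:
--             count += 1
--         out.append(count)
--     return out
-- ===== Notes on version B (the rewrite author's own statement) =====
-- stated objective: simpler
-- what changed: Replaces A's recursion that rebuilds/extends a `current` list at every step with a single iterative loop that keeps only the anchor minimum and a run counter (O(1) extra state, no recursion depth limit); equivalence is about the return value only (B does not mutate the caller's lists).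
import Mathlib
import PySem

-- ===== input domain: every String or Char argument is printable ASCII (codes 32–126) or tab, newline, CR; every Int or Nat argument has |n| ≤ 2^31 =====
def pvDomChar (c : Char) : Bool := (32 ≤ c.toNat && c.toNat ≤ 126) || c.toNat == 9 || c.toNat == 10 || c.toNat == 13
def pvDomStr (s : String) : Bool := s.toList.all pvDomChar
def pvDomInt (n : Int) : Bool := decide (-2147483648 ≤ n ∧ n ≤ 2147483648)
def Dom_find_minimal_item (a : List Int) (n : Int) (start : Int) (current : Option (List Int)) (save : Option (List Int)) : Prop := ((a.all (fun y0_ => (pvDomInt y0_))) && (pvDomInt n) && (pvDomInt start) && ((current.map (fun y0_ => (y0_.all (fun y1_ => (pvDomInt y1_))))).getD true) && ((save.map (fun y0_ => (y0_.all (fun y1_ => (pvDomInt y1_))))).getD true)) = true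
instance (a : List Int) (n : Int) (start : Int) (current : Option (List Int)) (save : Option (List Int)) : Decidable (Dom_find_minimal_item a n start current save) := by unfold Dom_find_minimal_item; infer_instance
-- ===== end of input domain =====

-- B replaces A's recursion over a materialized `current` list with one iterative
-- loop keeping only the anchor minimum and a run counter; return value only
-- (A mutates the caller's `current`/`save` lists, B does not).


-- ===== PORT A =====
-- A's recursion; the `none` from pyGet? (IndexError) is outside Pre_ and returns save.
def find_minimal_item_go (a : List Int) (n start : Int) (current save : List Int) : List Int :=
  if _h : start ≥ n then save
  else
    match PySem.List.pyGet? a start with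
    | none => save      -- Python raises IndexError here; excluded by Pre_
    | some v =>
      if current = [] ∨ v < current.headD 0 then
        find_minimal_item_go a n (start + 1) [v] (save ++ [((1 : Int))])
      else
        find_minimal_item_go a n (start + 1) (current ++ [v]) (save ++ [((current.length + 1 : Int))])
termination_by (n - start).toNat
decreasing_by all_goals omega

def find_minimal_item (a : List Int) (n : Int) (start : Int) (current : Option (List Int)) (save : Option (List Int)) : List Int :=
  find_minimal_item_go a n start (current.getD []) (save.getD [])

-- ===== PORT B =====
def find_minimal_item_alt (a : List Int) (n : Int) (start : Int) (current : Option (List Int)) (save : Option (List Int)) : List Int :=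
  let cur := current.getD []
  let st0 : Option Int × Int × List Int := (cur.head?, (cur.length : Int), save.getD [])
  ((PySem.List.pyRange start n 1).foldl (fun st i =>
      match PySem.List.pyGet? a i with
      | none => st     -- Python raises IndexError here; excluded by Pre_
      | some v =>
        match st with
        | (anchor, count, out) =>
          if anchor.isNone ∨ v < anchor.getD 0 then (some v, 1, out ++ [(1 : Int)])
          else (anchor, count + 1, out ++ [count + 1])) st0).2.2

-- ===== PRECONDITION & SPEC =====
-- Pre_ excludes exactly the inputs where Python A raises IndexError (some index in
-- [start, n) outside Python's valid range for a).
def Pre_find_minimal_item (a : List Int) (n : Int) (start : Int) (current : Option (List Int)) (save : Option (List Int)) : Prop :=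
  n ≤ start ∨ (-(a.length : Int) ≤ start ∧ n ≤ (a.length : Int))
instance (a : List Int) (n : Int) (start : Int) (current : Option (List Int)) (save : Option (List Int)) : Decidable (Pre_find_minimal_item a n start current save) := by unfold Pre_find_minimal_item; infer_instance

def pvWitness_find_minimal_item : List Int × Int × Int × Option (List Int) × Option (List Int) := ([3, 1, 2], 3, 0, none, none)

def Spec_find_minimal_item (a : List Int) (n : Int) (start : Int) (current : Option (List Int)) (save : Option (List Int)) (out : List Int) : Prop := out = find_minimal_item_alt a n start current save
instance (a : List Int) (n : Int) (start : Int) (current : Option (List Int)) (save : Option (List Int)) (out : List Int) : Decidable (Spec_find_minimal_item a n start current save out) := by unfold Spec_find_minimal_item; infer_instance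

-- ===== CLAIM (what is proved, stated in full; the proofs are below) =====
def Claim_equal_find_minimal_item : Prop := ∀ (a : List Int) (n : Int) (start : Int) (current : Option (List Int)) (save : Option (List Int)), Dom_find_minimal_item a n start current save → Pre_find_minimal_item a n start current save → Spec_find_minimal_item a n start current save (find_minimal_item a n start current save)

-- ===== LEMMAS AND PROOFS =====

-- The B-side loop body, named for the proofs.
def fmiStep (a : List Int) (st : Option Int × Int × List Int) (i : Int) : Option Int × Int × List Int :=
  match PySem.List.pyGet? a i with
  | none => st
  | some v =>
    match st with
    | (anchor, count, out) =>
      if anchor.isNone ∨ v < anchor.getD 0 then (some v, 1, out ++ [(1 : Int)])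
      else (anchor, count + 1, out ++ [count + 1])

theorem fmiB_eq_foldl (a : List Int) (n start : Int) (current save : Option (List Int)) :
    find_minimal_item_alt a n start current save =
      ((PySem.List.pyRange start n 1).foldl (fmiStep a)
        ((current.getD []).head?, ((current.getD []).length : Int), save.getD [])).2.2 := by
  rfl

-- Main invariant: A's recursion equals B's fold when the fold state abstracts `current`.
theorem fmi_go_eq_foldl (a : List Int) (n : Int) :
    ∀ (fuel : ℕ) (start : Int) (cur save : List Int),
      fuel = (n - start).toNat →
      (∀ i : Int, start ≤ i → i < n → -(a.length : Int) ≤ i ∧ i < (a.length : Int)) →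
      find_minimal_item_go a n start cur save =
        ((PySem.List.pyRange start n 1).foldl (fmiStep a)
          (cur.head?, (cur.length : Int), save)).2.2 := by
  intro fuel
  induction fuel with
  | zero =>
    intro start cur save hf _
    have hns : n ≤ start := by omega
    rw [PySem.List.pyRange_one_eq_nil hns]
    rw [find_minimal_item_go, dif_pos hns]
    rfl
  | succ k ih =>
    intro start cur save hf hidx
    by_cases hlt : start < n
    · have hv : PySem.Raise.InRange a.length start := by
        have := hidx start le_rfl hlt
        exact ⟨this.1, this.2⟩
      obtain ⟨v, hvsome⟩ : ∃ v, PySem.List.pyGet? a start = some v := by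
        have hsome : (PySem.List.pyGet? a start).isSome := by
          rw [Option.isSome_iff_ne_none]
          intro hnone
          exact (PySem.List.pyGet?_eq_none_iff a start).mp hnone hv
        exact Option.isSome_iff_exists.mp hsome
      rw [PySem.List.pyRange_one_cons hlt, List.foldl_cons]
      rw [find_minimal_item_go]
      simp only [show ¬ (start ≥ n) from not_le.mpr hlt, dif_neg, not_false_iff, hvsome]
      have hstep : fmiStep a (cur.head?, (cur.length : Int), save) start =
          (if cur = [] ∨ v < cur.headD 0 then
            (((v :: []).head?), (((v :: []).length : Int)), save ++ [(1 : Int)])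
           else ((cur ++ [v]).head?, ((cur ++ [v]).length : Int), save ++ [((cur.length + 1 : Int))])) := by
        unfold fmiStep
        rw [hvsome]
        cases cur with
        | nil => simp
        | cons c cs =>
          simp only [List.head?_cons, List.headD_cons, List.cons_append, List.length_cons]
          by_cases hvc : v < c
          · simp [hvc]
          · simp [hvc]
      rw [hstep]
      by_cases hcond : cur = [] ∨ v < cur.headD 0
      · simp only [if_pos hcond]
        rw [ih (start + 1) [v] (save ++ [(1 : Int)]) (by omega)
          (fun i h1 h2 => hidx i (by omega) h2)]
      · simp only [if_neg hcond]
        rw [ih (start + 1) (cur ++ [v]) (save ++ [((cur.length + 1 : Int))]) (by omega)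
          (fun i h1 h2 => hidx i (by omega) h2)]
    · have hns : n ≤ start := not_lt.mp hlt
      rw [PySem.List.pyRange_one_eq_nil hns]
      rw [find_minimal_item_go, dif_pos hns]
      rfl

-- ===== VERDICT (by name: the statement is the Claim_ definition above) =====
theorem find_minimal_item_spec : Claim_equal_find_minimal_item := by
  intro a n start current save _hdom hpre
  unfold Spec_find_minimal_item
  rw [fmiB_eq_foldl]
  unfold find_minimal_item
  rcases hpre with h | h
  · exact fmi_go_eq_foldl a n ((n - start).toNat) start _ _ rfl (fun i h1 h2 => by omega)
  · exact fmi_go_eq_foldl a n ((n - start).toNat) start _ _ rfl (fun i h1 h2 => ⟨by omega, by omega⟩)
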